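-- pv_equiv track=rewrite | github.com/svidenovic/mode-chordsProg-gen | vModeProgCalculator_.py | gen_re_pattern_
-- ===== SOURCE A (Python) =====
-- def gen_re_pattern_( mode_name ):
-- 	re_pattern = r"";
-- 	for ln in range(2, len(mode_name)+1):
-- 		mode_name_part = r"";
-- 		for i in range(0,ln):
-- 			mode_name_part += r""+mode_name[i];
-- 		re_pattern += mode_name_part;
-- 		if ln < len(mode_name):
-- 			re_pattern += "|";
-- 	return re_pattern;
-- ===== SOURCE B (Python) =====
-- def gen_re_pattern_(mode_name):
--     # Single accumulating pass: grow a running prefix, collect it once it has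
--     # length >= 2, then join the collected prefixes with "|".
--     prefix = ""
--     parts = []
--     for ch in mode_name:
--         prefix += ch
--         if len(prefix) >= 2:
--             parts.append(prefix)
--     return "|".join(parts)
-- ===== Notes on version B (the rewrite author's own statement) =====
-- stated objective: faster
-- what changed: Replaces the nested loop that rebuilds every prefix character-by-character from index 0 with one accumulating pass that extends a running prefix, collects it when its length reaches 2, and joins the collected prefixes with the pipe separator.
import Mathlib
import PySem

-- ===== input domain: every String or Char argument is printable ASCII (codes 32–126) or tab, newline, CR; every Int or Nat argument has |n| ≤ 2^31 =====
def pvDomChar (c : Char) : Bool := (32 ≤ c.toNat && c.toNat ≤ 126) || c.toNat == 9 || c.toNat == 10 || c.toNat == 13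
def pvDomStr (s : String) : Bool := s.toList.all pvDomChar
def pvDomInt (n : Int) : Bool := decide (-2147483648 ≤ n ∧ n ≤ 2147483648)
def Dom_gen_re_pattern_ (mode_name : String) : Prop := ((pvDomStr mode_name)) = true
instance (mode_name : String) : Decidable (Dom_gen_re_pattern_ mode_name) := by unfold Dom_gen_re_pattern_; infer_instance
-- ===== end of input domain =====

-- B replaces A's nested prefix-rebuilding loops by one accumulating pass (running prefix +
-- collected parts, joined with a pipe separator); equivalence of the return values is proved for all inputs.

-- ===== PORT A =====
-- literal port of A: outer loop over range(2, len+1); inner loop rebuilds each prefix from index 0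
def gen_re_pattern_ (mode_name : String) : String :=
  String.mk
    ((PySem.List.pyRange 2 ((mode_name.toList.length : Int) + 1) 1).foldl
      (fun re_pattern ln =>
        let mode_name_part :=
          (PySem.List.pyRange 0 ln 1).foldl
            (fun p i => p ++ [PySem.List.pyGetD mode_name.toList i ' ']) []
        let re2 := re_pattern ++ mode_name_part
        if ln < (mode_name.toList.length : Int) then re2 ++ ['|'] else re2)
      [])

-- ===== PORT B =====
-- literal port of B: one pass, extending a running prefix and collecting it once its length ≥ 2
def gen_re_pattern__alt (mode_name : String) : String :=
  let st := mode_name.toList.foldl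
    (fun (st : List Char × List (List Char)) ch =>
      let p := st.1 ++ [ch]
      if 2 ≤ p.length then (p, st.2 ++ [p]) else (p, st.2))
    ([], [])
  String.mk (PySem.Chars.join ['|'] st.2)

-- ===== PRECONDITION & SPEC =====
def Spec_gen_re_pattern_ (mode_name : String) (out : String) : Prop := out = gen_re_pattern__alt mode_name
instance (mode_name : String) (out : String) : Decidable (Spec_gen_re_pattern_ mode_name out) := by unfold Spec_gen_re_pattern_; infer_instance

-- ===== CLAIM (what is proved, stated in full; the proofs are below) =====
def Claim_equal_gen_re_pattern_ : Prop := ∀ (mode_name : String), Dom_gen_re_pattern_ mode_name → Spec_gen_re_pattern_ mode_name (gen_re_pattern_ mode_name)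

-- ===== LEMMAS AND PROOFS =====

-- the list of prefixes of length 2..n, common normal form of both programs
def pvCanon (l : List Char) : List (List Char) :=
  (List.range (l.length - 1)).map (fun k => l.take (k + 2))

lemma pv_take_eq_map_getD (cs : List Char) (m : Nat) (d : Char) (hm : m ≤ cs.length) :
    (List.range m).map (fun j => cs.getD j d) = cs.take m := by
  apply List.ext_getElem
  · simp [hm]
  · intro i h1 h2
    simp only [List.getElem_map, List.getElem_range, List.getElem_take]
    have hi : i < cs.length := by simp at h2; omega
    simp [List.getD_eq_getElem?_getD, List.getElem?_eq_getElem hi]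

lemma pv_inner (cs : List Char) (k : Nat) (hk : k ≤ cs.length) :
    (PySem.List.pyRange 0 (k : Int) 1).foldl
      (fun p i => p ++ [PySem.List.pyGetD cs i ' ']) [] = cs.take k := by
  rw [PySem.List.pyRange_one]
  simp only [Int.sub_zero, Int.toNat_natCast, List.foldl_map,
    PySem.List.foldl_append_singleton_eq_map, List.nil_append]
  have : ∀ j : Nat, PySem.List.pyGetD cs ((0 : Int) + j) ' ' = cs.getD j ' ' := by
    intro j; rw [Int.zero_add]; exact PySem.List.pyGetD_natCast cs j ' '
  simp only [this]
  exact pv_take_eq_map_getD cs k ' ' hk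

lemma pv_join_snoc (ps : List (List Char)) (p : List Char) :
    PySem.Chars.join ['|'] (ps ++ [p]) =
      PySem.Chars.join ['|'] ps ++ (if ps.isEmpty then [] else ['|']) ++ p := by
  induction ps with
  | nil => simp [PySem.Chars.join_nil, PySem.Chars.join_singleton]
  | cons a ps ih =>
    cases ps with
    | nil =>
      simp [PySem.Chars.join_singleton, PySem.Chars.join_cons_cons]
    | cons b l =>
      have h1 : PySem.Chars.join ['|'] ((a :: b :: l) ++ [p])
          = a ++ ['|'] ++ PySem.Chars.join ['|'] ((b :: l) ++ [p]) := by
        simpa using PySem.Chars.join_cons_cons ['|'] a b (l ++ [p])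
      rw [h1, ih]
      simp [PySem.Chars.join_cons_cons, List.append_assoc]

lemma pv_A_partial (cs : List Char) (m : Nat) (hm : m ≤ cs.length - 1) :
    ((List.range m).map (fun k : Nat => (2 : Int) + (k : Int))).foldl
      (fun re_pattern ln =>
        let mode_name_part :=
          (PySem.List.pyRange 0 ln 1).foldl
            (fun p i => p ++ [PySem.List.pyGetD cs i ' ']) []
        let re2 := re_pattern ++ mode_name_part
        if ln < (cs.length : Int) then re2 ++ ['|'] else re2)
      []
    = PySem.Chars.join ['|'] ((List.range m).map (fun k => cs.take (k + 2)))
      ++ (if 0 < m ∧ m < cs.length - 1 then ['|'] else []) := by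
  induction m with
  | zero => simp [PySem.Chars.join_nil]
  | succ m ih =>
    have hm' : m ≤ cs.length - 1 := by omega
    have hlen : m + 2 ≤ cs.length := by omega
    rw [List.range_succ]
    simp only [List.map_append, List.map_cons, List.map_nil, List.foldl_append,
      List.foldl_cons, List.foldl_nil]
    rw [ih hm']
    have hcast : ((2 : Int) + (m : Int)) = ((m + 2 : Nat) : Int) := by push_cast; ring
    rw [hcast, pv_inner cs (m + 2) hlen]
    have hmlt : m < cs.length - 1 := by omega
    rw [pv_join_snoc]
    have hcond : (((m + 2 : Nat) : Int) < (cs.length : Int)) ↔ (m + 1 < cs.length - 1) := by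
      constructor
      · intro h; omega
      · intro h; push_cast; omega
    by_cases hlast : m + 1 < cs.length - 1
    · rw [if_pos (hcond.mpr hlast), if_pos (And.intro (Nat.succ_pos m) hlast)]
      rcases Nat.eq_zero_or_pos m with h0 | h0
      · subst h0; simp
      · have h0' : m ≠ 0 := by omega
        simp [h0, h0', hmlt, List.isEmpty_iff, List.map_eq_nil_iff, List.range_eq_nil, List.append_assoc]
    · rw [if_neg (fun h => hlast (hcond.mp h)), if_neg (show ¬(0 < m + 1 ∧ m + 1 < cs.length - 1) from fun h => hlast h.2)]
      rcases Nat.eq_zero_or_pos m with h0 | h0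
      · subst h0; simp
      · have h0' : m ≠ 0 := by omega
        simp [h0, h0', hmlt, List.isEmpty_iff, List.map_eq_nil_iff, List.range_eq_nil, List.append_assoc]

lemma pv_A_canon (s : String) :
    gen_re_pattern_ s = String.mk (PySem.Chars.join ['|'] (pvCanon s.toList)) := by
  unfold gen_re_pattern_
  rw [PySem.List.pyRange_one]
  have h1 : (((s.toList.length : Int) + 1 - 2)).toNat = s.toList.length - 1 := by omega
  rw [h1, pv_A_partial s.toList (s.toList.length - 1) le_rfl]
  simp [pvCanon]

lemma pv_B_fst (l acc : List Char) (parts : List (List Char)) :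
    (l.foldl
      (fun (st : List Char × List (List Char)) ch =>
        let p := st.1 ++ [ch]
        if 2 ≤ p.length then (p, st.2 ++ [p]) else (p, st.2))
      (acc, parts)).1 = acc ++ l := by
  induction l generalizing acc parts with
  | nil => simp
  | cons c l ih =>
    simp only [List.foldl_cons]
    split_ifs <;> rw [ih] <;> simp

lemma pv_canon_snoc (t : List Char) (c : Char) (ht : t ≠ []) :
    pvCanon (t ++ [c]) = pvCanon t ++ [t ++ [c]] := by
  obtain ⟨m, hm⟩ : ∃ m, t.length = m + 1 := by
    cases t with
    | nil => exact absurd rfl ht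
    | cons a t => exact ⟨t.length, by simp⟩
  unfold pvCanon
  have hlen : (t ++ [c]).length - 1 = m + 1 := by simp [hm]
  rw [hlen, hm, List.range_succ, List.map_append]
  congr 1
  · apply List.map_congr_left
    intro k hk
    have hk' : k < m := List.mem_range.mp hk
    rw [List.take_append_of_le_length (by omega)]
  · simp only [List.map_cons, List.map_nil]
    rw [List.take_of_length_le (by simp [hm])]

lemma pv_B_snd (l : List Char) :
    (l.foldl
      (fun (st : List Char × List (List Char)) ch =>
        let p := st.1 ++ [ch]
        if 2 ≤ p.length then (p, st.2 ++ [p]) else (p, st.2))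
      ([], [])).2 = pvCanon l := by
  induction l using List.reverseRecOn with
  | nil => simp [pvCanon]
  | append_singleton t c ih =>
    rw [List.foldl_append]
    simp only [List.foldl_cons, List.foldl_nil]
    have hfst := pv_B_fst t [] []
    cases t with
    | nil =>
      simp [pvCanon]
    | cons a t' =>
      have hne : (a :: t') ≠ [] := by simp
      rw [pv_canon_snoc (a :: t') c hne]
      simp only [hfst, List.nil_append] at *
      have hlen : 2 ≤ ((a :: t') ++ [c]).length := by simp
      rw [if_pos hlen, ih]

lemma pv_B_canon (s : String) :
    gen_re_pattern__alt s = String.mk (PySem.Chars.join ['|'] (pvCanon s.toList)) := by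
  show String.mk (PySem.Chars.join ['|']
    (s.toList.foldl
      (fun (st : List Char × List (List Char)) ch =>
        let p := st.1 ++ [ch]
        if 2 ≤ p.length then (p, st.2 ++ [p]) else (p, st.2))
      ([], [])).2) = _
  rw [pv_B_snd]

-- ===== VERDICT (by name: the statement is the Claim_ definition above) =====
theorem gen_re_pattern__spec : Claim_equal_gen_re_pattern_ := by
  intro s _
  unfold Spec_gen_re_pattern_
  rw [pv_A_canon, pv_B_canon]
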